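-- pv_equiv track=rewrite | github.com/sugipamo/oopstracker | src/oopstracker/filters/trivial_filter.py | _is_test_function_name
-- ===== SOURCE A (Python) =====
-- def _is_test_function_name(function_name: str) -> bool:
--     """Check if a function name indicates it's a test function."""
--     if not function_name:
--         return False
--
--     test_patterns = [
--         # Standard test patterns
--         lambda name: name.startswith('test_'),
--         lambda name: name.startswith('Test'),
--         lambda name: name.endswith('_test'),
--         lambda name: name.endswith('Test'),
--
--         # Setup/teardown patterns
--         lambda name: name in ['setUp', 'tearDown', 'setup', 'teardown'],
--         lambda name: name.startswith('setup_'),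
--         lambda name: name.startswith('teardown_'),
--         lambda name: name == 'setUpClass',
--         lambda name: name == 'tearDownClass',
--         lambda name: name == 'setup_method',
--         lambda name: name == 'teardown_method',
--         lambda name: name == 'setup_function',
--         lambda name: name == 'teardown_function',
--
--         # Pytest fixtures
--         lambda name: name.startswith('pytest_'),
--         lambda name: name in ['conftest', 'fixture'],
--
--         # Assertion helpers
--         lambda name: name.startswith('assert_'),
--         lambda name: name.startswith('check_'),
--
--         # Mock/patch helpers
--         lambda name: name.startswith('mock_'),
--         lambda name: name.startswith('patch_'),
--     ]
--
--     return any(pattern(function_name) for pattern in test_patterns)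
-- ===== SOURCE B (Python) =====
-- _PREFIX_WORDS = frozenset({'test', 'setup', 'teardown', 'pytest',
--                            'assert', 'check', 'mock', 'patch'})
-- _PLAIN_NAMES = frozenset({'setUp', 'tearDown', 'setup', 'teardown',
--                           'setUpClass', 'tearDownClass', 'conftest', 'fixture'})
--
--
-- def _is_test_function_name(function_name: str) -> bool:
--     """Check if a function name indicates it's a test function."""
--     if '_' in function_name:
--         if function_name.partition('_')[0] in _PREFIX_WORDS:
--             return True
--         if function_name.rpartition('_')[2] == 'test':
--             return True
--     return (function_name[:4] == 'Test'
--             or function_name[-4:] == 'Test'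
--             or function_name in _PLAIN_NAMES)
-- ===== Notes on version B (the rewrite author's own statement) =====
-- stated objective: alternative
-- what changed: Instead of scanning A's list of 19 per-call lambda predicates with any(), B partitions the name at its first and last underscore and decides by set lookup of the first segment (one lookup replaces all eight underscore-prefix scans) and an equality test of the last segment, with a 4-character slice comparison for the CamelCase 'Test' affixes and a residual set of eight underscore-free exact names (the four setup_/teardown_ exact names are absorbed by the first-segment rule).
import Mathlib
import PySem

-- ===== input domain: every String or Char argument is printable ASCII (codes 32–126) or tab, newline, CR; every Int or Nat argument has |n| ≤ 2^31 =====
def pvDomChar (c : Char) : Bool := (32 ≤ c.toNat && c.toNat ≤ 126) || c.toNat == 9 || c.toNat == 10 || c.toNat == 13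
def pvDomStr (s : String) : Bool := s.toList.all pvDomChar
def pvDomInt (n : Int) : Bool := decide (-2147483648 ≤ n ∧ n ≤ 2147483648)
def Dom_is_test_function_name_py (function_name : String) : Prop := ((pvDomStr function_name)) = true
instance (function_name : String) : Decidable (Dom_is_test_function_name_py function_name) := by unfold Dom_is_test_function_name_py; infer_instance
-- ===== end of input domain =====

-- B classifies the name by its underscore-delimited first/last segment (one partition + set lookup)
-- plus a 4-char slice test for the 'Test' affixes and a small residual exact-name set, instead of
-- A's list of 19 per-call lambdas scanned by any(); objective: alternative decomposition.


-- ===== PORT A =====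
def is_test_function_name_py (function_name : String) : Bool :=
  if function_name = "" then false
  else
    let test_patterns : List (String → Bool) := [
      -- Standard test patterns
      (fun name => PySem.Str.startswith name "test_"),
      (fun name => PySem.Str.startswith name "Test"),
      (fun name => PySem.Str.endswith name "_test"),
      (fun name => PySem.Str.endswith name "Test"),
      -- Setup/teardown patterns
      (fun name => decide (name ∈ ["setUp", "tearDown", "setup", "teardown"])),
      (fun name => PySem.Str.startswith name "setup_"),
      (fun name => PySem.Str.startswith name "teardown_"),
      (fun name => decide (name = "setUpClass")),
      (fun name => decide (name = "tearDownClass")),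
      (fun name => decide (name = "setup_method")),
      (fun name => decide (name = "teardown_method")),
      (fun name => decide (name = "setup_function")),
      (fun name => decide (name = "teardown_function")),
      -- Pytest fixtures
      (fun name => PySem.Str.startswith name "pytest_"),
      (fun name => decide (name ∈ ["conftest", "fixture"])),
      -- Assertion helpers
      (fun name => PySem.Str.startswith name "assert_"),
      (fun name => PySem.Str.startswith name "check_"),
      -- Mock/patch helpers
      (fun name => PySem.Str.startswith name "mock_"),
      (fun name => PySem.Str.startswith name "patch_")
    ]
    test_patterns.any (fun pattern => pattern function_name)

-- ===== PORT B =====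
-- the two frozensets of Source B (distinct literals, so a plain distinct list)
def pvPrefixWords : List String :=
  ["test", "setup", "teardown", "pytest", "assert", "check", "mock", "patch"]
def pvPlainNames : List String :=
  ["setUp", "tearDown", "setup", "teardown", "setUpClass", "tearDownClass", "conftest", "fixture"]

-- Source B's final fall-through return expression (reached from both branches of the '_' test)
def pvPlainChecks (function_name : String) : Bool :=
  -- function_name[:4] == 'Test'
  (PySem.List.slice function_name.toList none (some 4) == "Test".toList)
  -- function_name[-4:] == 'Test'
  || (PySem.List.slice function_name.toList (some (-4)) none == "Test".toList)
  || decide (function_name ∈ pvPlainNames)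

def is_test_function_name_py_alt (function_name : String) : Bool :=
  if PySem.Str.isIn "_" function_name then
    -- partition('_')[0]: the characters before the first '_' (exact here: '_' occurs in the name)
    if pvPrefixWords.any (fun w => function_name.toList.takeWhile (· != '_') == w.toList) then true
    -- rpartition('_')[2]: the characters after the last '_' (exact here: '_' occurs in the name)
    else if (function_name.toList.reverse.takeWhile (· != '_')).reverse == "test".toList then true
    else pvPlainChecks function_name
  else pvPlainChecks function_name

-- ===== PRECONDITION & SPEC =====
def Spec_is_test_function_name_py (function_name : String) (out : Bool) : Prop := out = is_test_function_name_py_alt function_name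
instance (function_name : String) (out : Bool) : Decidable (Spec_is_test_function_name_py function_name out) := by unfold Spec_is_test_function_name_py; infer_instance

-- ===== CLAIM (what is proved, stated in full; the proofs are below) =====
def Claim_equal_is_test_function_name_py : Prop := ∀ (function_name : String), Dom_is_test_function_name_py function_name → Spec_is_test_function_name_py function_name (is_test_function_name_py function_name)

-- ===== LEMMAS AND PROOFS =====

-- the common characterisation both programs are proved equivalent to
def pvQ (s : String) : Prop :=
  ('_' ∈ s.toList ∧
    (s.toList.takeWhile (· != '_') = "test".toList ∨
     s.toList.takeWhile (· != '_') = "setup".toList ∨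
     s.toList.takeWhile (· != '_') = "teardown".toList ∨
     s.toList.takeWhile (· != '_') = "pytest".toList ∨
     s.toList.takeWhile (· != '_') = "assert".toList ∨
     s.toList.takeWhile (· != '_') = "check".toList ∨
     s.toList.takeWhile (· != '_') = "mock".toList ∨
     s.toList.takeWhile (· != '_') = "patch".toList)) ∨
  ('_' ∈ s.toList ∧ (s.toList.reverse.takeWhile (· != '_')).reverse = "test".toList) ∨
  s.toList.take 4 = "Test".toList ∨
  s.toList.drop (s.toList.length - 4) = "Test".toList ∨
  s ∈ pvPlainNames

lemma pvShuffle {x t su td py aS ch mo pa rt tk dr n1 n2 n3 n4 n5 n6 n7 n8 m1 m2 m3 m4 : Prop}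
    (h1 : m1 → x ∧ su) (h2 : m2 → x ∧ td) (h3 : m3 → x ∧ su) (h4 : m4 → x ∧ td) :
    ((x ∧ t) ∨ tk ∨ (x ∧ rt) ∨ dr ∨ (n1 ∨ n2 ∨ n3 ∨ n4) ∨ (x ∧ su) ∨ (x ∧ td) ∨ n5 ∨ n6 ∨
      m1 ∨ m2 ∨ m3 ∨ m4 ∨ (x ∧ py) ∨ (n7 ∨ n8) ∨ (x ∧ aS) ∨ (x ∧ ch) ∨ (x ∧ mo) ∨ (x ∧ pa)) ↔
    ((x ∧ (t ∨ su ∨ td ∨ py ∨ aS ∨ ch ∨ mo ∨ pa)) ∨ (x ∧ rt) ∨ tk ∨ dr ∨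
      (n1 ∨ n2 ∨ n3 ∨ n4 ∨ n5 ∨ n6 ∨ n7 ∨ n8)) := by
  constructor
  · rintro (⟨hx, h⟩ | h | ⟨hx, h⟩ | h | (h | h | h | h) | ⟨hx, h⟩ | ⟨hx, h⟩ | h | h |
      h | h | h | h | ⟨hx, h⟩ | (h | h) | ⟨hx, h⟩ | ⟨hx, h⟩ | ⟨hx, h⟩ | ⟨hx, h⟩) <;>
    first
      | simp [hx, h]
      | simp [h]
      | exact Or.inl ⟨(h1 h).1, Or.inr (Or.inl (h1 h).2)⟩
      | exact Or.inl ⟨(h2 h).1, Or.inr (Or.inr (Or.inl (h2 h).2))⟩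
      | exact Or.inl ⟨(h3 h).1, Or.inr (Or.inl (h3 h).2)⟩
      | exact Or.inl ⟨(h4 h).1, Or.inr (Or.inr (Or.inl (h4 h).2))⟩
  · rintro (⟨hx, (h | h | h | h | h | h | h | h)⟩ | ⟨hx, h⟩ | h | h |
      (h | h | h | h | h | h | h | h)) <;>
    first
      | simp [hx, h]
      | simp [h]

lemma pvInfixSingleton (c : Char) (l : List Char) : [c] <:+: l ↔ c ∈ l := by
  constructor
  · intro h; exact h.mem (List.mem_singleton_self c)
  · intro h
    obtain ⟨u, v, rfl⟩ := List.append_of_mem h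
    exact ⟨u, v, by simp⟩

lemma pvPrefixUnderscore (p : List Char) (hp : '_' ∉ p) (l : List Char) :
    p ++ ['_'] <+: l ↔ ('_' ∈ l ∧ l.takeWhile (· != '_') = p) := by
  induction p generalizing l with
  | nil =>
    cases l with
    | nil => simp
    | cons c t =>
      by_cases hc : c = '_'
      · subst hc
        simp [List.takeWhile_cons, List.cons_prefix_cons]
      · have hc' : (c != '_') = true := by simp [hc]
        simp [List.takeWhile_cons, hc', List.cons_prefix_cons, hc, Ne.symm hc]
  | cons a p ih =>
    have ha : a ≠ '_' := fun h => hp (h ▸ List.mem_cons_self ..)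
    have hp' : '_' ∉ p := fun h => hp (List.mem_cons_of_mem _ h)
    cases l with
    | nil => simp
    | cons c t =>
      by_cases hc : c = '_'
      · subst hc
        simp [List.takeWhile_cons, List.cons_prefix_cons, ha]
      · have hc' : (c != '_') = true := by simp [hc]
        rw [List.cons_append, List.cons_prefix_cons, ih hp']
        constructor
        · rintro ⟨rfl, hm, htw⟩
          exact ⟨List.mem_cons_of_mem _ hm, by simp [List.takeWhile_cons, hc', htw]⟩
        · rintro ⟨hm, htw⟩
          rw [List.takeWhile_cons, if_pos hc'] at htw
          have hca : c = a := (List.cons_eq_cons.mp htw).1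
          have htw' := (List.cons_eq_cons.mp htw).2
          have hm' : '_' ∈ t := by
            rcases List.mem_cons.mp hm with h | h
            · exact absurd h.symm hc
            · exact h
          exact ⟨hca.symm, hm', htw'⟩

lemma pvSuffixTest (l : List Char) :
    "_test".toList <:+ l ↔ ('_' ∈ l ∧ (l.reverse.takeWhile (· != '_')).reverse = "test".toList) := by
  have h1 : "_test".toList <:+ l ↔ ("_test".toList).reverse <+: l.reverse := List.reverse_prefix.symm
  have h2 : ("_test".toList).reverse = "tset".toList ++ ['_'] := by decide
  rw [h1, h2, pvPrefixUnderscore "tset".toList (by decide) l.reverse]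
  rw [List.mem_reverse, List.reverse_eq_iff]
  constructor
  · rintro ⟨hm, htw⟩; exact ⟨hm, by rw [htw]; decide⟩
  · rintro ⟨hm, htw⟩; exact ⟨hm, by rw [htw]; decide⟩

lemma pvStartsIff (s w wu : String) (h : wu.toList = w.toList ++ ['_']) (hw : '_' ∉ w.toList) :
    PySem.Chars.startswith s.toList wu.toList = true ↔
      ('_' ∈ s.toList ∧ s.toList.takeWhile (· != '_') = w.toList) := by
  rw [PySem.Chars.startswith_iff, h]
  exact pvPrefixUnderscore _ hw _

lemma pvTakeTest (l : List Char) :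
    PySem.Chars.startswith l "Test".toList = true ↔ l.take 4 = "Test".toList := by
  rw [PySem.Chars.startswith_iff, List.prefix_iff_eq_take,
      show ("Test".toList).length = 4 from by decide]
  exact eq_comm

lemma pvDropTest (l : List Char) :
    PySem.Chars.endswith l "Test".toList = true ↔ l.drop (l.length - 4) = "Test".toList := by
  rw [PySem.Chars.endswith_iff, List.suffix_iff_eq_drop,
      show ("Test".toList).length = 4 from by decide]
  exact eq_comm

lemma pvPlain_iff (s : String) :
    pvPlainChecks s = true ↔
      (s.toList.take 4 = "Test".toList ∨
       s.toList.drop (s.toList.length - 4) = "Test".toList ∨ s ∈ pvPlainNames) := by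
  unfold pvPlainChecks
  have h1 : PySem.List.slice s.toList none (some 4) = s.toList.take (Int.toNat 4) :=
    PySem.List.slice_to _ (by norm_num)
  have h2 : PySem.List.slice s.toList (some (-4)) none = s.toList.drop (s.toList.length - 4) :=
    PySem.List.slice_from_neg_ofNat s.toList 4 (by norm_num)
  rw [h1, h2]
  simp [or_assoc]

lemma pvA_iff (s : String) : is_test_function_name_py s = true ↔ pvQ s := by
  by_cases hs : s = ""
  · subst hs
    constructor
    · intro h; exact absurd h (by decide)
    · intro h
      unfold pvQ pvPlainNames at h
      revert h; decide
  · unfold is_test_function_name_py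
    rw [if_neg hs]
    have hp1 := pvStartsIff s "test" "test_" (by decide) (by decide)
    have hp2 := pvStartsIff s "setup" "setup_" (by decide) (by decide)
    have hp3 := pvStartsIff s "teardown" "teardown_" (by decide) (by decide)
    have hp4 := pvStartsIff s "pytest" "pytest_" (by decide) (by decide)
    have hp5 := pvStartsIff s "assert" "assert_" (by decide) (by decide)
    have hp6 := pvStartsIff s "check" "check_" (by decide) (by decide)
    have hp7 := pvStartsIff s "mock" "mock_" (by decide) (by decide)
    have hp8 := pvStartsIff s "patch" "patch_" (by decide) (by decide)
    have ht1 := pvTakeTest s.toList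
    have ht2 := pvDropTest s.toList
    have hsu : PySem.Chars.endswith s.toList "_test".toList = true ↔
        ('_' ∈ s.toList ∧ (s.toList.reverse.takeWhile (· != '_')).reverse = "test".toList) := by
      rw [PySem.Chars.endswith_iff]; exact pvSuffixTest s.toList
    have e1 : s = "setup_method" →
        ('_' ∈ s.toList ∧ s.toList.takeWhile (· != '_') = "setup".toList) := by
      rintro rfl; decide
    have e2 : s = "teardown_method" →
        ('_' ∈ s.toList ∧ s.toList.takeWhile (· != '_') = "teardown".toList) := by
      rintro rfl; decide
    have e3 : s = "setup_function" →
        ('_' ∈ s.toList ∧ s.toList.takeWhile (· != '_') = "setup".toList) := by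
      rintro rfl; decide
    have e4 : s = "teardown_function" →
        ('_' ∈ s.toList ∧ s.toList.takeWhile (· != '_') = "teardown".toList) := by
      rintro rfl; decide
    simp only [List.any_cons, List.any_nil, Bool.or_false, Bool.or_eq_true,
      PySem.Str.startswith_eq, PySem.Str.endswith_eq, decide_eq_true_eq,
      List.mem_cons, List.not_mem_nil, or_false]
    unfold pvQ pvPlainNames
    simp only [List.mem_cons, List.not_mem_nil, or_false]
    rw [hp1, hp2, hp3, hp4, hp5, hp6, hp7, hp8, ht1, ht2, hsu]
    exact pvShuffle e1 e2 e3 e4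

lemma pvB_iff (s : String) : is_test_function_name_py_alt s = true ↔ pvQ s := by
  unfold is_test_function_name_py_alt
  have hwords : (pvPrefixWords.any (fun w => s.toList.takeWhile (· != '_') == w.toList)) = true ↔
      (s.toList.takeWhile (· != '_') = "test".toList ∨
       s.toList.takeWhile (· != '_') = "setup".toList ∨
       s.toList.takeWhile (· != '_') = "teardown".toList ∨
       s.toList.takeWhile (· != '_') = "pytest".toList ∨
       s.toList.takeWhile (· != '_') = "assert".toList ∨
       s.toList.takeWhile (· != '_') = "check".toList ∨
       s.toList.takeWhile (· != '_') = "mock".toList ∨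
       s.toList.takeWhile (· != '_') = "patch".toList) := by
    unfold pvPrefixWords
    simp [or_assoc]
  by_cases h1 : PySem.Str.isIn "_" s = true
  · have hu : '_' ∈ s.toList := by
      have h := (PySem.Str.isIn_iff_infix _ _).mp h1
      rw [show ("_" : String).toList = ['_'] from by decide] at h
      exact (pvInfixSingleton _ _).mp h
    rw [if_pos h1]
    by_cases h2 : (pvPrefixWords.any (fun w => s.toList.takeWhile (· != '_') == w.toList)) = true
    · rw [if_pos h2]
      exact iff_of_true rfl (Or.inl ⟨hu, hwords.mp h2⟩)
    · rw [if_neg h2]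
      by_cases h3 : ((s.toList.reverse.takeWhile (· != '_')).reverse == "test".toList) = true
      · rw [if_pos h3]
        exact iff_of_true rfl (Or.inr (Or.inl ⟨hu, by simpa using h3⟩))
      · rw [if_neg h3]
        rw [pvPlain_iff]
        unfold pvQ
        constructor
        · rintro (h | h | h)
          · exact Or.inr (Or.inr (Or.inl h))
          · exact Or.inr (Or.inr (Or.inr (Or.inl h)))
          · exact Or.inr (Or.inr (Or.inr (Or.inr h)))
        · rintro (⟨_, hw⟩ | ⟨_, hw⟩ | h | h | h)
          · exact absurd (hwords.mpr hw) h2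
          · exact absurd (by simpa using hw) h3
          · exact Or.inl h
          · exact Or.inr (Or.inl h)
          · exact Or.inr (Or.inr h)
  · rw [if_neg h1]
    have hu : '_' ∉ s.toList := fun hm => h1 (by
      rw [PySem.Str.isIn_iff_infix, show ("_" : String).toList = ['_'] from by decide]
      exact (pvInfixSingleton _ _).mpr hm)
    rw [pvPlain_iff]
    unfold pvQ
    constructor
    · rintro (h | h | h)
      · exact Or.inr (Or.inr (Or.inl h))
      · exact Or.inr (Or.inr (Or.inr (Or.inl h)))
      · exact Or.inr (Or.inr (Or.inr (Or.inr h)))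
    · rintro (⟨hm, _⟩ | ⟨hm, _⟩ | h | h | h)
      · exact absurd hm hu
      · exact absurd hm hu
      · exact Or.inl h
      · exact Or.inr (Or.inl h)
      · exact Or.inr (Or.inr h)

-- ===== VERDICT (by name: the statement is the Claim_ definition above) =====
set_option maxHeartbeats 2000000 in
theorem is_test_function_name_py_spec : Claim_equal_is_test_function_name_py := by
  intro s _
  unfold Spec_is_test_function_name_py
  have h := (pvA_iff s).trans (pvB_iff s).symm
  cases hA : is_test_function_name_py s <;> cases hB : is_test_function_name_py_alt s <;>
    simp_all
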